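-- pv_equiv track=rewrite | github.com/DexterHK/codons-Visualizer | backend/utils/codon_utils.py | alph3
-- ===== SOURCE A (Python) =====
-- def remove_spaces(s: str) -> str:
--     """Remove spaces from string."""
--     return s.replace(" ", "")
--
-- def remove_backslashes(s: str) -> str:
--     """Remove backslashes from string."""
--     return s.replace("\n", "")
--
-- def alph3(codons_string: str, codon_length: int = None) -> str:
--     """Apply alpha-3 transformation (left shift by 3) to each codon in the string."""
--     # Remove spaces and newlines first
--     clean_string = remove_spaces(remove_backslashes(codons_string))
--
--     # If codon_length not provided, try to determine from string length
--     if codon_length is None: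
--         if len(clean_string) % 4 == 0:
--             codon_length = 4
--         else:
--             # If not divisible by 4, return original string
--             return codons_string
--
--     # Alpha-3 is typically only meaningful for length 4 codons
--     if codon_length != 4:
--         return codons_string
--
--     result = ""
--     for i in range(0, len(clean_string), codon_length):
--         codon = clean_string[i:i + codon_length]
--         if len(codon) == codon_length:
--             # Left shift by 3: first three characters go to end
--             shifted_codon = codon[3:] + codon[:3]
--             result += shifted_codon
--         else:
--             result += codon  # If incomplete codon, keep as is
--
--     return result
-- ===== SOURCE B (Python) =====
-- def alph3(codons_string: str, codon_length: int = None) -> str: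
--     """Alpha-3: in every complete 4-char codon, move the last char to the front.
--     Computed per character: output[i] is clean[i+3] at the first position of a
--     block and clean[i-1] at the other three; the tail stays as is."""
--     clean = codons_string.replace("\n", "").replace(" ", "")
--     n = len(clean)
--     if codon_length is None:
--         if n % 4 != 0:
--             return codons_string
--     elif codon_length != 4:
--         return codons_string
--     full = n - n % 4
--     shifted = "".join(clean[i + 3] if i % 4 == 0 else clean[i - 1] for i in range(full))
--     return shifted + clean[full:]
-- ===== Notes on version B (the rewrite author's own statement) =====
-- stated objective: alternative
-- what changed: A slices each 4-char codon out of the cleaned string and concatenates the permuted chunks in a stepped loop; B computes the output per character with a single index map (output[i] = clean[i+3] when i%4==0 else clean[i-1]) joined once, then appends the untouched tail.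
import Mathlib
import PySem

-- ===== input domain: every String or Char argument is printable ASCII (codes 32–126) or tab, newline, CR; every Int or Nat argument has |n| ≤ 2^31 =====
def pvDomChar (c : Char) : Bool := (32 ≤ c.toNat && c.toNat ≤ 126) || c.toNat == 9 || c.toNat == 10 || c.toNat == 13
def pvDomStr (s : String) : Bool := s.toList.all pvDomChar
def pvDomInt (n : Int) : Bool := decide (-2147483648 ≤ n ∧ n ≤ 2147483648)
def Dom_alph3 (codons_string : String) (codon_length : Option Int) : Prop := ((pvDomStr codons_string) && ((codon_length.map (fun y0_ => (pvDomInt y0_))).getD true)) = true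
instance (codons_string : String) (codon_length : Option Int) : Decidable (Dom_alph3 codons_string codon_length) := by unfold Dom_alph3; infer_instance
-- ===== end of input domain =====

-- B replaces A's chunk-slicing loop by a per-character index map (objective: alternative, same cost).

-- ===== PORT A =====
-- the stepped 'for i in range(0, len(clean), codon_length)' loop as its obvious structural
-- recursion on the index; on every path reaching the loop codon_length = 4, so the step and
-- slice width are 4
def alph3Go (l : List Char) (n : Int) (i : Int) (result : List Char) : List Char :=
  if i < n then
    let codon := PySem.List.slice l (some i) (some (i + 4))
    let chunk := if (codon.length : Int) = 4
      then PySem.List.slice codon (some 3) none ++ PySem.List.slice codon none (some 3)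
      else codon
    alph3Go l n (i + 4) (result ++ chunk)
  else result
termination_by (n - i).toNat
decreasing_by omega

def alph3 (codons_string : String) (codon_length : Option Int) : String :=
  let clean := PySem.Str.replace (PySem.Str.replace codons_string "\n" "") " " ""
  match codon_length with
  | none =>
    if PySem.Str.len clean % 4 = 0 then
      -- codon_length is set to 4, so the subsequent 'codon_length != 4' test is false
      String.ofList (alph3Go clean.toList (PySem.Str.len clean) 0 [])
    else codons_string
  | some k =>
    if k ≠ 4 then codons_string
    else String.ofList (alph3Go clean.toList (PySem.Str.len clean) 0 [])

-- ===== PORT B =====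
def alph3_alt (codons_string : String) (codon_length : Option Int) : String :=
  let clean := PySem.Str.replace (PySem.Str.replace codons_string "\n" "") " " ""
  let l := clean.toList
  let n := l.length
  let gate : Bool := match codon_length with
    | none => n % 4 == 0
    | some k => k == 4
  if gate then
    let full := n - n % 4
    let shifted := (List.range full).map
      (fun i => if i % 4 = 0 then l.getD (i + 3) ' ' else l.getD (i - 1) ' ')
    String.ofList (shifted ++ l.drop full)
  else codons_string

-- ===== PRECONDITION & SPEC =====
def Spec_alph3 (codons_string : String) (codon_length : Option Int) (out : String) : Prop := out = alph3_alt codons_string codon_length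
instance (codons_string : String) (codon_length : Option Int) (out : String) : Decidable (Spec_alph3 codons_string codon_length out) := by unfold Spec_alph3; infer_instance

-- ===== CLAIM (what is proved, stated in full; the proofs are below) =====
def Claim_equal_alph3 : Prop := ∀ (codons_string : String) (codon_length : Option Int), Dom_alph3 codons_string codon_length → Spec_alph3 codons_string codon_length (alph3 codons_string codon_length)

-- ===== LEMMAS AND PROOFS =====

-- the common mathematical result: rotate every complete 4-block, keep the tail
def blocks : List Char → List Char
  | a :: b :: c :: d :: t => d :: a :: b :: c :: blocks t
  | t => t

theorem blocks_short (l : List Char) (h : l.length < 4) : blocks l = l := by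
  match l, h with
  | [], _ => rfl
  | [a], _ => rfl
  | [a, b], _ => rfl
  | [a, b, c], _ => rfl

-- A's loop computes `blocks`
theorem goA (l : List Char) (i : Nat) (acc : List Char) :
    alph3Go l (l.length : Int) (i : Int) acc = acc ++ blocks (l.drop i) := by
  rw [alph3Go]
  have hslice : PySem.List.slice l (some (i : Int)) (some ((i : Int) + 4)) =
      (l.drop i).take 4 := by
    have := PySem.List.slice_natCast_add (xs := l) (j := i) (n := 4)
    simpa using this
  have hcast : ((i : Int) + 4) = (((i + 4 : Nat)) : Int) := by push_cast; ring
  by_cases h : (i : Int) < (l.length : Int)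
  · simp only [h, if_true]
    by_cases h4 : 4 ≤ (l.drop i).length
    · obtain ⟨a, b, c, d, t, ht⟩ : ∃ a b c d t, l.drop i = a :: b :: c :: d :: t := by
        match hd : l.drop i, h4 with
        | a :: b :: c :: d :: t, _ => exact ⟨a, b, c, d, t, rfl⟩
      have htail : l.drop (i + 4) = t := by
        rw [← List.drop_drop, ht]; rfl
      rw [hslice, ht]
      norm_num [PySem.List.slice_from, PySem.List.slice_to,
        show ((3:Int)).toNat = 3 from rfl]
      rw [hcast, goA l (i + 4) _, htail]
      simp [blocks]
    · have hlen : (l.drop i).length < 4 := by omega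
      have htake : (l.drop i).take 4 = l.drop i := List.take_of_length_le (by omega)
      have hne : ¬ ((((l.drop i).take 4).length : Int) = 4) := by
        rw [htake]; exact_mod_cast (show ¬ (l.drop i).length = 4 by omega)
      have htail : l.drop (i + 4) = [] := by
        apply List.drop_eq_nil_of_le
        have := l.length_drop (i := i)
        omega
      rw [hslice, if_neg hne, htake, hcast, goA l (i + 4) _, htail, blocks_short _ hlen]
      simp [blocks]
  · simp only [h, if_false]
    have : l.drop i = [] := List.drop_eq_nil_of_le (by exact_mod_cast le_of_not_gt h)
    simp [this, blocks]
termination_by l.length - i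
decreasing_by all_goals omega

-- B's index map plus untouched tail computes `blocks` as well
theorem goB (l : List Char) :
    (List.range (l.length - l.length % 4)).map
      (fun i => if i % 4 = 0 then l.getD (i + 3) ' ' else l.getD (i - 1) ' ')
      ++ l.drop (l.length - l.length % 4) = blocks l := by
  match l with
  | [] => rfl
  | [a] => rfl
  | [a, b] => rfl
  | [a, b, c] => rfl
  | a :: b :: c :: d :: t =>
    have ih := goB t
    have hfull : (a :: b :: c :: d :: t).length - (a :: b :: c :: d :: t).length % 4
        = 4 + (t.length - t.length % 4) := by simp; omega
    rw [hfull, List.range_add, List.map_append, List.map_map]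
    have h4 : (List.range 4).map
        (fun i => if i % 4 = 0 then (a :: b :: c :: d :: t).getD (i + 3) ' '
                  else (a :: b :: c :: d :: t).getD (i - 1) ' ') = [d, a, b, c] := by
      simp [List.range_succ]
    have hshift : (List.range (t.length - t.length % 4)).map
        ((fun i => if i % 4 = 0 then (a :: b :: c :: d :: t).getD (i + 3) ' '
                   else (a :: b :: c :: d :: t).getD (i - 1) ' ') ∘ (fun i => 4 + i))
        = (List.range (t.length - t.length % 4)).map
        (fun i => if i % 4 = 0 then t.getD (i + 3) ' ' else t.getD (i - 1) ' ') := by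
      apply List.map_congr_left
      intro j _
      have hm : (4 + j) % 4 = j % 4 := Nat.add_mod_left 4 j
      simp only [Function.comp, hm]
      by_cases hz : j % 4 = 0
      · have h1 : 4 + j + 3 = (j + 3) + 1 + 1 + 1 + 1 := by omega
        simp [hz, h1]
      · have hj : 1 ≤ j := by omega
        have h1 : 4 + j - 1 = (j - 1) + 1 + 1 + 1 + 1 := by omega
        simp [hz, h1]
    have hdrop : (a :: b :: c :: d :: t).drop (4 + (t.length - t.length % 4))
        = t.drop (t.length - t.length % 4) := by
      rw [← List.drop_drop]
      rfl
    rw [h4, hshift, hdrop, blocks, ← ih]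
    simp

-- ===== VERDICT (by name: the statement is the Claim_ definition above) =====
theorem alph3_spec : Claim_equal_alph3 := by
  intro cs cl _
  show alph3 cs cl = alph3_alt cs cl
  unfold alph3 alph3_alt
  have key : ∀ s : String,
      String.ofList (alph3Go s.toList (PySem.Str.len s) 0 []) =
      String.ofList ((List.range (s.toList.length - s.toList.length % 4)).map
        (fun i => if i % 4 = 0 then s.toList.getD (i + 3) ' ' else s.toList.getD (i - 1) ' ')
        ++ s.toList.drop (s.toList.length - s.toList.length % 4)) := by
    intro s
    have h0 := goA s.toList 0 []
    simp only [Nat.cast_zero, List.drop_zero, List.nil_append] at h0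
    rw [goB, show PySem.Str.len s = (s.toList.length : Int) by simp, h0]
  cases cl with
  | none =>
    simp only [alph3]
    by_cases hc : (PySem.Chars.replace (PySem.Chars.replace cs.toList ['\n'] []) [' '] []).length % 4 = 0
    · rw [if_pos (by simp; omega), if_pos (by simp; omega)]
      exact key _
    · rw [if_neg (by simp; omega), if_neg (by simp; omega)]
  | some k =>
    simp only [alph3_alt]
    by_cases hk : k = 4
    · rw [if_neg (by simp [hk]), if_pos (by simp [hk])]
      exact key _
    · rw [if_pos hk, if_neg (by simpa using hk)]
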